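-- pv_equiv track=rewrite | github.com/dev-logic12/Problem-Solving | 프로그래머스/unrated/181890. 왼쪽 오른쪽/왼쪽 오른쪽.py | solution
-- ===== SOURCE A (Python) =====
-- def solution(str_list):
--     answer = next((i for i, s in enumerate(str_list) if s == "l" or s == "r"), -1)
--
--     if answer == -1:
--         return []
--     elif str_list[answer] == "l":
--         return str_list[:answer]
--     else:
--         return str_list[answer + 1:]
-- ===== SOURCE B (Python) =====
-- def solution(str_list):
--     it = iter(str_list)
--     acc = []
--     for s in it:
--         if s == "l":
--             return acc
--         if s == "r":
--             return list(it)
--         acc.append(s)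
--     return []
-- ===== Notes on version B (the rewrite author's own statement) =====
-- stated objective: alternative
-- what changed: Replaces A's staged find-index-then-slice (positional next() over enumerate plus subscript slicing) by a single streaming pass over an iterator with an accumulator: elements before the marker are collected as they are consumed, and on 'r' the remainder is taken by exhausting the same iterator, so no index or slice is ever computed.
import Mathlib
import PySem

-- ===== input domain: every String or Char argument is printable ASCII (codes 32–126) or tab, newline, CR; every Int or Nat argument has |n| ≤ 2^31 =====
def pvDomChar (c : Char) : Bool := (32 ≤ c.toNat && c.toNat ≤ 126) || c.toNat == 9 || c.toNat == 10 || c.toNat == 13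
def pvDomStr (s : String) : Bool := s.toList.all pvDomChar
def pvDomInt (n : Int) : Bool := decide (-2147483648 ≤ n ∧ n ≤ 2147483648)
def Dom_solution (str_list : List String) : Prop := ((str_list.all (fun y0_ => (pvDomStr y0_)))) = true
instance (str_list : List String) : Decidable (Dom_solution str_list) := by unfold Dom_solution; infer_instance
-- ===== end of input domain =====

-- B replaces A's find-index-then-slice with a single streaming pass that accumulates the prefix
-- and returns the iterator's remainder on 'r'; no index or slice computed (alternative, not faster).


-- ===== PORT A =====
-- the next((i for i, s in enumerate(str_list) if ...), -1) generator: first matching index, else -1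
def findLR : List String → Int → Int
  | [], _ => -1
  | s :: rest, i => if s = "l" ∨ s = "r" then i else findLR rest (i + 1)

def solution (str_list : List String) : List String :=
  let answer := findLR str_list 0
  if answer = -1 then []
  -- str_list[answer]: answer is a valid non-negative index here, pyGet? is exact
  else if PySem.List.pyGet? str_list answer = some "l" then
    PySem.List.slice str_list none (some answer)
  else
    PySem.List.slice str_list (some (answer + 1)) none

-- ===== PORT B =====
-- the 'for s in it' loop: consume the list, acc.append(s) on ordinary elements,
-- return acc on 'l', return list(it) (the unconsumed remainder) on 'r', [] if exhausted
def goB : List String → List String → List String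
  | [], _ => []
  | s :: rest, acc =>
      if s = "l" then acc
      else if s = "r" then rest
      else goB rest (acc ++ [s])

def solution_alt (str_list : List String) : List String := goB str_list []

-- ===== PRECONDITION & SPEC =====
def Spec_solution (str_list : List String) (out : List String) : Prop := out = solution_alt str_list
instance (str_list : List String) (out : List String) : Decidable (Spec_solution str_list out) := by unfold Spec_solution; infer_instance

-- ===== CLAIM (what is proved, stated in full; the proofs are below) =====
def Claim_equal_solution : Prop := ∀ (str_list : List String), Dom_solution str_list → Spec_solution str_list (solution str_list)

-- ===== LEMMAS AND PROOFS =====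

-- every list is clean, or splits as clean-prefix ++ first 'l'/'r' ++ rest
theorem lr_decomp (l : List String) :
    (∀ x ∈ l, x ≠ "l" ∧ x ≠ "r") ∨
    ∃ pre x suf, l = pre ++ x :: suf ∧ (x = "l" ∨ x = "r") ∧ ∀ y ∈ pre, y ≠ "l" ∧ y ≠ "r" := by
  induction l with
  | nil => exact Or.inl (by simp)
  | cons s rest ih =>
    by_cases hs : s = "l" ∨ s = "r"
    · exact Or.inr ⟨[], s, rest, by simp, hs, by simp⟩
    · push Not at hs
      rcases ih with h | ⟨pre, x, suf, heq, hx, hpre⟩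
      · exact Or.inl (by simpa [hs] using h)
      · refine Or.inr ⟨s :: pre, x, suf, by simp [heq], hx, ?_⟩
        intro y hy
        rcases List.mem_cons.mp hy with rfl | hy
        · exact hs
        · exact hpre y hy

theorem findLR_clean (l : List String) (h : ∀ x ∈ l, x ≠ "l" ∧ x ≠ "r") (i : Int) :
    findLR l i = -1 := by
  induction l generalizing i with
  | nil => rfl
  | cons s rest ih =>
    have hs := h s (by simp)
    simp [findLR, hs.1, hs.2]
    exact ih (fun x hx => h x (by simp [hx])) _

theorem findLR_decomp (pre : List String) (x : String) (suf : List String)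
    (hx : x = "l" ∨ x = "r") (hpre : ∀ y ∈ pre, y ≠ "l" ∧ y ≠ "r") (i : Int) :
    findLR (pre ++ x :: suf) i = i + pre.length := by
  induction pre generalizing i with
  | nil => simp [findLR, hx]
  | cons s rest ih =>
    have hs := hpre s (by simp)
    simp only [List.cons_append, findLR, hs.1, hs.2, or_self, List.length_cons]
    rw [ih (fun y hy => hpre y (by simp [hy])) (i + 1)]
    push_cast; ring

theorem goB_clean (l : List String) (h : ∀ x ∈ l, x ≠ "l" ∧ x ≠ "r") (acc : List String) :
    goB l acc = [] := by
  induction l generalizing acc with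
  | nil => rfl
  | cons s rest ih =>
    have hs := h s (by simp)
    simp only [goB, hs.1, hs.2, if_false]
    exact ih (fun x hx => h x (by simp [hx])) _

theorem goB_decomp (pre : List String) (x : String) (suf : List String)
    (hx : x = "l" ∨ x = "r") (hpre : ∀ y ∈ pre, y ≠ "l" ∧ y ≠ "r") (acc : List String) :
    goB (pre ++ x :: suf) acc = if x = "l" then acc ++ pre else suf := by
  induction pre generalizing acc with
  | nil =>
    rcases hx with rfl | rfl <;> simp [goB]
  | cons s rest ih =>
    have hs := hpre s (by simp)
    simp only [List.cons_append, goB, hs.1, hs.2, if_false]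
    rw [ih (fun y hy => hpre y (by simp [hy])) (acc ++ [s])]
    rcases hx with rfl | rfl <;> simp

-- ===== VERDICT (by name: the statement is the Claim_ definition above) =====
theorem solution_spec : Claim_equal_solution := by
  intro l _
  unfold Spec_solution
  rcases lr_decomp l with hclean | ⟨pre, x, suf, rfl, hx, hpre⟩
  · have hA : findLR l 0 = -1 := findLR_clean l hclean 0
    simp [solution, solution_alt, hA, goB_clean l hclean]
  · have hA : findLR (pre ++ x :: suf) 0 = (pre.length : Int) := by
      simpa using findLR_decomp pre x suf hx hpre 0
    have hget : PySem.List.pyGet? (pre ++ x :: suf) (pre.length : Int) = some x := by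
      rw [PySem.List.pyGet?_natCast]
      simp
    have hB := goB_decomp pre x suf hx hpre []
    rcases hx with rfl | rfl
    · have hAval : solution (pre ++ "l" :: suf) = pre := by
        simp only [solution, hA]
        rw [if_neg (by omega), if_pos hget, PySem.List.slice_to_natCast, List.take_left]
      simp only [solution_alt, hB]
      rw [hAval]
      simp
    · have hdrop : (pre ++ "r" :: suf).drop (pre.length + 1) = suf := by
        rw [List.append_cons]
        exact List.drop_left' (by simp)
      have hcast : (pre.length : Int) + 1 = ((pre.length + 1 : Nat) : Int) := by push_cast; ring
      have hAval : solution (pre ++ "r" :: suf) = suf := by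
        simp only [solution, hA]
        rw [if_neg (by omega), if_neg (by rw [hget]; simp), hcast,
          PySem.List.slice_from_natCast, hdrop]
      simp only [solution_alt, hB]
      rw [hAval]
      simp
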